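-- pv_equiv track=rewrite | github.com/utopia-group/WebQA | parser_lib/markdown_parser.py | escape_characters
-- ===== SOURCE A (Python) =====
-- def escape_characters(content):
--     ESCAPABLE = '!"#$%&\'()*+,-./:;<=>?@[\\]^_`{|}~'
--     res = []
--     i = 0
--     while i < len(content):
--         ch = content[i]
--         if ch == '\\' and i + 1 < len(content) and content[i + 1] in ESCAPABLE:
--             res.append((content[i + 1], True))
--             i += 2
--         else:
--             res.append((ch, False))
--             i += 1
--     return res
-- ===== SOURCE B (Python) =====
-- def escape_characters(content):
--     # Split the input on '\\' once, then process the delimiter-free segments: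
--     # the scan is driven by the segment list instead of a per-character loop.
--     ESCAPABLE = '!"#$%&\'()*+,-./:;<=>?@[\\]^_`{|}~'
--     parts = content.split('\\')
--     res = [(ch, False) for ch in parts[0]]
--     j = 1
--     n = len(parts)
--     while j < n:
--         p = parts[j]
--         if p:
--             if p[0] in ESCAPABLE:
--                 res.append((p[0], True))
--                 res.extend((ch, False) for ch in p[1:])
--             else:
--                 res.append(('\\', False))
--                 res.extend((ch, False) for ch in p)
--             j += 1
--         elif j < n - 1:
--             # empty segment before the end: the backslash escaped a backslash
--             res.append(('\\', True))
--             res.extend((ch, False) for ch in parts[j + 1])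
--             j += 2
--         else:
--             res.append(('\\', False))
--             j += 1
--     return res
-- ===== Notes on version B (the rewrite author's own statement) =====
-- stated objective: alternative
-- what changed: Replaced A's per-character index loop with explicit lookahead by a staged approach: split the string on backslash once, then process the delimiter-free segments (first char of a segment decides escaped/literal, an empty segment encodes an escaped backslash).
import Mathlib
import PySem

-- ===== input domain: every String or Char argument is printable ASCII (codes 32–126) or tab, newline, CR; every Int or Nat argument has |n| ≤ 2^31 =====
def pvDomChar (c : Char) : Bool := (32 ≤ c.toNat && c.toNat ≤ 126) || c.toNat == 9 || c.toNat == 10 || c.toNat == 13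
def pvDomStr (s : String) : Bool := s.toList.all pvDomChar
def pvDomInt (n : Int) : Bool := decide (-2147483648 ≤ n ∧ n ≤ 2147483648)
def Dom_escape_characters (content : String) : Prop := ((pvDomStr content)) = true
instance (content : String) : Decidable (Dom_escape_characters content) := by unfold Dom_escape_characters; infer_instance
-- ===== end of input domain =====

-- B splits the input on '\\' once and processes the delimiter-free segments;
-- same return value as A (alternative decomposition), no argument is mutated.

-- ===== PORT A =====
-- ESCAPABLE = '!"#$%&\'()*+,-./:;<=>?@[\\]^_`{|}~'  (shared literal constant)
def pvEscList : List Char := "!\"#$%&'()*+,-./:;<=>?@[\\]^_`{|}~".toList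

-- A's while loop over index i: content[i] is the head of the remaining suffix,
-- content[i+1] the next element; i += 2 drops two chars, i += 1 drops one.
def pvGoA : List Char → List (String × Bool)
  | [] => []
  | [c] => [(String.ofList [c], false)]
  | c :: d :: rest =>
      if c = '\\' ∧ d ∈ pvEscList then
        (String.ofList [d], true) :: pvGoA rest
      else
        (String.ofList [c], false) :: pvGoA (d :: rest)

def escape_characters (content : String) : List (String × Bool) :=
  pvGoA content.toList

-- ===== PORT B =====
-- content.split('\\') on the character list (Python split: n separators give n+1 parts)
def pvSplit : List Char → List (List Char)
  | [] => [[]]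
  | c :: rest =>
      if c = '\\' then [] :: pvSplit rest
      else
        match pvSplit rest with
        | [] => [[c]]          -- unreachable: pvSplit never returns []
        | p :: ps => (c :: p) :: ps

-- a segment's characters as plain (ch, False) tuples
def pvPlain (p : List Char) : List (String × Bool) :=
  p.map (fun ch => (String.ofList [ch], false))

-- B's while loop over parts[1:]; each recursive call consumes one part (j += 1)
-- or, for an escaped backslash, two parts (j += 2)
def pvGoB : List (List Char) → List (String × Bool)
  | [] => []
  | p :: ps =>
      match p with
      | c :: pr =>
          (if c ∈ pvEscList then
            (String.ofList [c], true) :: pvPlain pr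
          else
            ("\\", false) :: pvPlain (c :: pr)) ++ pvGoB ps
      | [] =>
          match ps with
          | [] => [("\\", false)]
          | q :: qs => ("\\", true) :: pvPlain q ++ pvGoB qs

def escape_characters_alt (content : String) : List (String × Bool) :=
  match pvSplit content.toList with
  | [] => []                   -- unreachable: split always yields at least one part
  | p :: ps => pvPlain p ++ pvGoB ps

-- ===== PRECONDITION & SPEC =====
def Spec_escape_characters (content : String) (out : List (String × Bool)) : Prop := out = escape_characters_alt content
instance (content : String) (out : List (String × Bool)) : Decidable (Spec_escape_characters content out) := by unfold Spec_escape_characters; infer_instance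

-- ===== CLAIM (what is proved, stated in full; the proofs are below) =====
def Claim_equal_escape_characters : Prop := ∀ (content : String), Dom_escape_characters content → Spec_escape_characters content (escape_characters content)

-- ===== LEMMAS AND PROOFS =====

-- B's result as a function of the character list
def pvF (l : List Char) : List (String × Bool) :=
  match pvSplit l with
  | [] => []
  | p :: ps => pvPlain p ++ pvGoB ps

theorem pvSplit_ne_nil (l : List Char) : pvSplit l ≠ [] := by
  cases l with
  | nil => simp [pvSplit]
  | cons c rest =>
      by_cases hc : c = '\\'
      · simp [pvSplit, hc]
      · simp only [pvSplit, if_neg hc]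
        cases pvSplit rest <;> simp

theorem pvF_cons_ne (c : Char) (rest : List Char) (hc : ¬ c = '\\') :
    pvF (c :: rest) = (String.ofList [c], false) :: pvF rest := by
  unfold pvF
  simp only [pvSplit, if_neg hc]
  cases h : pvSplit rest with
  | nil => exact absurd h (pvSplit_ne_nil rest)
  | cons p ps => simp [pvPlain]

theorem pvF_bs (rest : List Char) :
    pvF ('\\' :: rest) = pvGoB (pvSplit rest) := by
  unfold pvF
  simp [pvSplit, pvPlain]

-- main correspondence: A's two-step scan equals B's split-and-process
theorem pvGoA_eq_pvF (l : List Char) : pvGoA l = pvF l := by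
  induction hn : l.length using Nat.strong_induction_on generalizing l with
  | _ n ih =>
    subst hn
    cases l with
    | nil => simp [pvGoA, pvF, pvSplit, pvGoB, pvPlain]
    | cons c rest =>
      by_cases hc : c = '\\'
      · subst hc
        rw [pvF_bs]
        cases rest with
        | nil => simp [pvGoA, pvSplit, pvGoB]
        | cons d r =>
          by_cases hd : d ∈ pvEscList
          · by_cases hdb : d = '\\'
            · subst hdb
              have hA : pvGoA ('\\' :: '\\' :: r) = (String.ofList ['\\'], true) :: pvGoA r := by
                simp [pvGoA, hd]
              rw [hA, ih r.length (by simp) r rfl]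
              simp only [pvSplit]
              cases h : pvSplit r with
              | nil => exact absurd h (pvSplit_ne_nil r)
              | cons q qs =>
                rw [pvF]; rw [h]
                simp [pvGoB, show String.ofList ['\\'] = "\\" from rfl]
            · have hA : pvGoA ('\\' :: d :: r) = (String.ofList [d], true) :: pvGoA r := by
                simp [pvGoA, hd]
              rw [hA, ih r.length (by simp) r rfl]
              simp only [pvSplit, if_neg hdb]
              cases h : pvSplit r with
              | nil => exact absurd h (pvSplit_ne_nil r)
              | cons q qs =>
                simp only [pvGoB, if_pos hd]
                rw [pvF]; rw [h]
                simp [pvPlain]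
          · have hdb : ¬ d = '\\' := by rintro rfl; exact hd (by decide)
            have hA : pvGoA ('\\' :: d :: r)
                = (String.ofList ['\\'], false) :: pvGoA (d :: r) := by
              simp [pvGoA, hd]
            rw [hA, ih (d :: r).length (by simp) (d :: r) rfl,
                pvF_cons_ne d r hdb]
            simp only [pvSplit, if_neg hdb]
            cases h : pvSplit r with
            | nil => exact absurd h (pvSplit_ne_nil r)
            | cons q qs =>
              simp only [pvGoB, if_neg hd]
              rw [pvF]; rw [h]
              simp [pvPlain, show String.ofList ['\\'] = "\\" from rfl]
      · have hA : pvGoA (c :: rest) = (String.ofList [c], false) :: pvGoA rest := by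
          cases rest with
          | nil => simp [pvGoA]
          | cons d r => simp [pvGoA, hc]
        rw [hA, ih rest.length (by simp) rest rfl, pvF_cons_ne c rest hc]

-- ===== VERDICT (by name: the statement is the Claim_ definition above) =====
theorem escape_characters_spec : Claim_equal_escape_characters := by
  intro content _
  unfold Spec_escape_characters escape_characters escape_characters_alt
  rw [pvGoA_eq_pvF]
  rfl
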